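-- pv_equiv track=rewrite | github.com/pedrobpio/decoder-lener-iob | src/scripts/eval_seqeval3.py | filter_and_merge_entities
-- ===== SOURCE A (Python) =====
-- import string
--
-- def preprocess_entity_text(text):
--     """Removes content after the first newline and any trailing punctuation."""
--     # 1. Remove content after '\n'
--     processed_text = text.split('\n', 1)[0]
--
--     # 2. Remove trailing punctuation repeatedly
--     #    (e.g., handles cases like "text..", "text?!")
--     while processed_text and processed_text[-1] in string.punctuation:
--         processed_text = processed_text[:-1]
--
--     # 3. Optional: Remove leading/trailing whitespace that might remain
--     processed_text = processed_text.strip()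
--
--     return processed_text
--
-- def filter_and_merge_entities(entities):
--     """
--     Preprocesses entity text, then filters to remove duplicates and
--     contained entities.
--
--     Preprocessing steps:
--     1. Removes text after the first newline ('\n').
--     2. Removes trailing punctuation.
--     """
--     if not entities:
--         return []
--
--     # --- Step 1: Preprocess all entity texts ---
--     preprocessed_entities = []
--     for label, text in entities:
--         cleaned_text = preprocess_entity_text(text)
--         # Keep the entity even if the cleaned_text becomes empty
--         preprocessed_entities.append((label, cleaned_text))
--
--     # --- Step 2: Remove exact duplicates after preprocessing ---
--     # Using set() automatically handles duplicates based on the (label, cleaned_text) tuple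
--     unique_entities = list(set(preprocessed_entities))
--
--     # --- Step 3: Handle simple cases ---
--     if len(unique_entities) <= 1:
--         unique_entities.sort() # Sort for consistent output
--         return unique_entities
--
--     # --- Step 4: Filter subsumed entities (using preprocessed text) ---
--     final_entities = []
--     # It's often good practice to sort before the nested loop,
--     # although the original code sorted at the end. Sorting here doesn't change correctness.
--     # unique_entities.sort()
--
--     for i in range(len(unique_entities)):
--         entity_a = unique_entities[i]
--         label_a, text_a = entity_a
--         is_subsumed_by_another = False
--
--         for j in range(len(unique_entities)):
--             if i == j: continue # Don't compare an entity with itself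
--
--             entity_b = unique_entities[j]
--             label_b, text_b = entity_b
--
--             # Check for subsumption:
--             # - Same label
--             # - Text A is not identical to Text B
--             # - Text A is contained within Text B
--             #   (e.g., "Bank" is in "Bank of America")
--             if label_a == label_b and text_a != text_b and text_a in text_b:
--                  # We should only consider non-empty text_a as being subsumed by a longer string.
--                  # An empty string '' is technically 'in' any other string,
--                  # but we usually don't want to remove ('LABEL', '') just because ('LABEL', 'something') exists.
--                  # However, the original logic *would* remove the empty string version.
--                  # Let's stick to the direct interpretation of the original logic for now.
--                  # If text_a is '', it will be subsumed by any non-empty text_b with the same label.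
--                 is_subsumed_by_another = True
--                 break # Found a entity (B) that subsumes A, no need to check further for A
--
--         if not is_subsumed_by_another:
--             final_entities.append(entity_a)
--
--     # --- Step 5: Sort the final list ---
--     final_entities.sort() # Sort based on label, then text
--     return final_entities
-- ===== SOURCE B (Python) =====
-- import string
--
-- _PUNCT = string.punctuation
--
--
-- def _clean(text):
--     """First line only, trailing punctuation stripped, then whitespace-stripped."""
--     head = text.split('\n', 1)[0]
--     head = head.rstrip(_PUNCT)
--     return head.strip()
--
--
-- def filter_and_merge_entities(entities):
--     cleaned = set((label, _clean(text)) for label, text in entities)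
--     by_label = {}
--     for label, text in cleaned:
--         by_label.setdefault(label, []).append(text)
--     return sorted((label, text) for label, text in cleaned
--                   if not any(text != other and text in other
--                              for other in by_label[label]))
-- ===== Notes on version B (the rewrite author's own statement) =====
-- stated objective: faster
-- what changed: B groups the deduplicated entities by label in a dict built once, so the subsumption test scans only same-label texts instead of A's all-pairs index loop over every unique entity, and B strips trailing punctuation with one rstrip call instead of A's pop-one-char-at-a-time slicing loop.
import Mathlib
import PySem

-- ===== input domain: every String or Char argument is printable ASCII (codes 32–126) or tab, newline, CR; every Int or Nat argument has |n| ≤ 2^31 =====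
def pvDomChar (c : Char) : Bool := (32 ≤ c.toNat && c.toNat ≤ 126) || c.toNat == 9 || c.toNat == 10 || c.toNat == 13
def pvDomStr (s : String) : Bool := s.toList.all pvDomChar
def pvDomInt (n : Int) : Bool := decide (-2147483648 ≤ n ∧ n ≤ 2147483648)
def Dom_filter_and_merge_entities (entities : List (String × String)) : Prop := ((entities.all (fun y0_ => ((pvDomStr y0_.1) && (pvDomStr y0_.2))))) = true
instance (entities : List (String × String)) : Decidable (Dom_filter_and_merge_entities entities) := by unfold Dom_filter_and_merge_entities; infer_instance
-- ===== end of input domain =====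

-- B replaces A's all-pairs index scan over the unique entities by a per-label grouping dict
-- (and A's pop-one-char-at-a-time punctuation loop by a single rstrip); same return value everywhere.

-- ===== PORT A =====
-- string.punctuation (used by both programs)
def pvPunct : List Char := "!\"#$%&'()*+,-./:;<=>?@[\\]^_`{|}~".toList

-- A's 'while processed_text and processed_text[-1] in string.punctuation: processed_text = processed_text[:-1]'
def aTrimPunct (cs : List Char) : List Char :=
  if h : cs = [] then cs
  else if pvPunct.contains (cs.getLast h) then aTrimPunct cs.dropLast else cs
termination_by cs.length
decreasing_by
  have := List.length_pos_of_ne_nil h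
  simp [List.length_dropLast]
  omega

def preprocess_entity_text (text : String) : String :=
  let processed := ((PySem.Str.splitMax? text "\n" 1).getD []).headD ""
  let processed := String.mk (aTrimPunct processed.toList)
  PySem.Str.strip processed

-- A's inner 'for j in range(len(unique_entities)): …' with its break
def aCheckRest (unique : List (String × String)) (i : Int) (la ta : String) : List Int → Bool
  | [] => false
  | j :: js =>
    if i == j then aCheckRest unique i la ta js
    else
      let eb := PySem.List.pyGetD unique j ("", "")
      if la == eb.1 && !(ta == eb.2) && PySem.Str.isIn ta eb.2 then true
      else aCheckRest unique i la ta js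

def filter_and_merge_entities (entities : List (String × String)) : List (String × String) :=
  if entities = [] then []
  else
    let preprocessed := entities.foldl (fun acc p => acc ++ [(p.1, preprocess_entity_text p.2)]) []
    let unique := PySem.Set.ofList preprocessed
    if PySem.List.len unique ≤ 1 then
      PySem.List.sorted2 unique (fun x => x.1) (fun x => x.2) false
    else
      let final := (PySem.List.pyRange 0 (PySem.List.len unique)).foldl (fun acc i =>
        let ea := PySem.List.pyGetD unique i ("", "")
        if aCheckRest unique i ea.1 ea.2 (PySem.List.pyRange 0 (PySem.List.len unique)) then acc
        else acc ++ [ea]) []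
      PySem.List.sorted2 final (fun x => x.1) (fun x => x.2) false

-- ===== PORT B =====
-- hand port of head.rstrip(string.punctuation): drop trailing punctuation characters (exact)
def pvRStripPunct (cs : List Char) : List Char := (cs.reverse.dropWhile pvPunct.contains).reverse

def bClean (text : String) : String :=
  let head := ((PySem.Str.splitMax? text "\n" 1).getD []).headD ""
  PySem.Str.strip (String.mk (pvRStripPunct head.toList))

def filter_and_merge_entities_alt (entities : List (String × String)) : List (String × String) :=
  let cleaned := PySem.Set.ofList (entities.map (fun p => (p.1, bClean p.2)))
  let byLabel := cleaned.foldl (fun d p => d.modify p.1 [] (fun v => v ++ [p.2])) PySem.Dict.empty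
  PySem.List.sorted2
    (cleaned.filter (fun p => !((byLabel.getD p.1 []).any (fun u => !(p.2 == u) && PySem.Str.isIn p.2 u))))
    (fun x => x.1) (fun x => x.2) false

-- ===== PRECONDITION & SPEC =====
def Spec_filter_and_merge_entities (entities : List (String × String)) (out : List (String × String)) : Prop := out = filter_and_merge_entities_alt entities
instance (entities : List (String × String)) (out : List (String × String)) : Decidable (Spec_filter_and_merge_entities entities out) := by unfold Spec_filter_and_merge_entities; infer_instance

-- ===== CLAIM (what is proved, stated in full; the proofs are below) =====
def Claim_equal_filter_and_merge_entities : Prop := ∀ (entities : List (String × String)), Dom_filter_and_merge_entities entities → Spec_filter_and_merge_entities entities (filter_and_merge_entities entities)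

-- ===== LEMMAS AND PROOFS =====

-- the subsumption test both programs perform, as a predicate
def pvCheck (e b : String × String) : Bool := e.1 == b.1 && !(e.2 == b.2) && PySem.Str.isIn e.2 b.2
def pvSub (U : List (String × String)) (e : String × String) : Bool := U.any (pvCheck e)

theorem pvCheck_self (e : String × String) : pvCheck e e = false := by simp [pvCheck]

theorem pv_beq_comm (a b : String) : (a == b) = (b == a) := by
  by_cases h : a = b
  · simp [h]
  · have h' : ¬ b = a := fun e => h e.symm
    simp [h, h']

theorem pv_any_filter {α : Type} (l : List α) (p q : α → Bool) :
    (l.filter p).any q = l.any (fun x => p x && q x) := by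
  induction l with
  | nil => rfl
  | cons x xs ih => cases hx : p x <;> simp [hx, ih]

theorem aTrimPunct_rev (rs : List Char) :
    aTrimPunct rs.reverse = (rs.dropWhile pvPunct.contains).reverse := by
  induction rs with
  | nil => rw [aTrimPunct]; simp
  | cons c rs ih =>
    rw [aTrimPunct]
    have hne : (c :: rs).reverse ≠ [] := by simp
    rw [dif_neg hne]
    have hlast : (c :: rs).reverse.getLast hne = c := by
      simp [List.reverse_cons]
    rw [hlast]
    cases hc : pvPunct.contains c with
    | true =>
      simp only [if_true]
      have hdl : (c :: rs).reverse.dropLast = rs.reverse := by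
        simp [List.reverse_cons]
      rw [hdl, ih, List.dropWhile_cons]
      have hc' : c ∈ pvPunct := by simpa using hc
      simp [hc']
    | false =>
      have hc' : ¬ c ∈ pvPunct := by simpa using hc
      simp [hc']

theorem aTrimPunct_eq (cs : List Char) : aTrimPunct cs = pvRStripPunct cs := by
  have := aTrimPunct_rev cs.reverse
  simpa [pvRStripPunct] using this

theorem clean_eq (t : String) : preprocess_entity_text t = bClean t := by
  simp [preprocess_entity_text, bClean, aTrimPunct_eq]

theorem aCheckRest_eq (U : List (String × String)) (i : Int) (la ta : String) (js : List Int) :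
    aCheckRest U i la ta js =
      js.any (fun j => if i == j then false else pvCheck (la, ta) (PySem.List.pyGetD U j ("", ""))) := by
  induction js with
  | nil => rfl
  | cons j js ih =>
    rw [List.any_cons, ← ih]
    by_cases hij : i = j
    · subst hij
      have hb : (i == i) = true := beq_self_eq_true i
      simp only [aCheckRest, hb, if_true, Bool.false_or]
    · have hb : (i == j) = false := by simpa using hij
      simp only [aCheckRest, hb, Bool.false_eq_true, if_false]
      change ((if pvCheck (la, ta) (PySem.List.pyGetD U j ("", "")) = true then true
          else aCheckRest U i la ta js)
        = (pvCheck (la, ta) (PySem.List.pyGetD U j ("", "")) || aCheckRest U i la ta js))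
      cases hC : pvCheck (la, ta) (PySem.List.pyGetD U j ("", "")) with
      | true => simp
      | false => simp

theorem pv_any_skip (g : Int → Bool) (i : Int) (js : List Int) (hgi : g i = false) :
    (js.any fun j => if i == j then false else g j) = js.any g := by
  induction js with
  | nil => rfl
  | cons j js ih =>
    rw [List.any_cons, List.any_cons, ih]
    cases hij : i == j with
    | true =>
      have h : i = j := by simpa using hij
      simp [← h, hgi]
    | false => simp

-- any over indices = any over the list
theorem pv_any_range (U : List (String × String)) (p : String × String → Bool) :
    ((PySem.List.pyRange 0 (PySem.List.len U)).any fun j => p (PySem.List.pyGetD U j ("", ""))) = U.any p := by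
  conv_rhs => rw [← PySem.List.map_pyGetD_pyRange_zero U ("", "")]
  rw [List.any_map]
  rfl

-- an index loop appending kept elements is a filter of the list
theorem pv_foldl_idx_filter (U : List (String × String)) (q : String × String → Bool) :
    ((PySem.List.pyRange 0 (PySem.List.len U)).foldl
        (fun acc i => if q (PySem.List.pyGetD U i ("", "")) = true
          then acc ++ [PySem.List.pyGetD U i ("", "")] else acc) []) = U.filter q := by
  refine (PySem.List.foldl_append_if (fun i => q (PySem.List.pyGetD U i ("", "")))
    (fun i => PySem.List.pyGetD U i ("", "")) (PySem.List.pyRange 0 (PySem.List.len U)) []).trans ?_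
  conv_rhs => rw [← PySem.List.map_pyGetD_pyRange_zero U ("", "")]
  rw [List.filter_map]
  simp [Function.comp_def]

-- A's nested loops compute 'keep e iff no other same-label entity text strictly contains e.2'
theorem aBody_filter (U : List (String × String)) :
    ((PySem.List.pyRange 0 (PySem.List.len U)).foldl (fun acc i =>
        let ea := PySem.List.pyGetD U i ("", "")
        if aCheckRest U i ea.1 ea.2 (PySem.List.pyRange 0 (PySem.List.len U)) then acc
        else acc ++ [ea]) []) = U.filter (fun e => !pvSub U e) := by
  have hbody : (fun (acc : List (String × String)) (i : Int) =>
      let ea := PySem.List.pyGetD U i ("", "")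
      if aCheckRest U i ea.1 ea.2 (PySem.List.pyRange 0 (PySem.List.len U)) then acc
      else acc ++ [ea])
      = (fun acc i => if (!pvSub U (PySem.List.pyGetD U i ("", ""))) = true
          then acc ++ [PySem.List.pyGetD U i ("", "")] else acc) := by
    funext acc i
    have h1 : aCheckRest U i (PySem.List.pyGetD U i ("", "")).1 (PySem.List.pyGetD U i ("", "")).2
        (PySem.List.pyRange 0 (PySem.List.len U)) = pvSub U (PySem.List.pyGetD U i ("", "")) := by
      rw [aCheckRest_eq]
      have h2 : (fun j => if i == j then false
          else pvCheck ((PySem.List.pyGetD U i ("", "")).1, (PySem.List.pyGetD U i ("", "")).2)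
            (PySem.List.pyGetD U j ("", "")))
          = (fun j => if i == j then false
          else pvCheck (PySem.List.pyGetD U i ("", "")) (PySem.List.pyGetD U j ("", ""))) := by
        funext j; rfl
      rw [h2, pv_any_skip _ i _ (pvCheck_self _),
        pv_any_range U (pvCheck (PySem.List.pyGetD U i ("", "")))]
      rfl
    simp only [h1]
    cases pvSub U (PySem.List.pyGetD U i ("", "")) <;> simp
  rw [hbody]
  exact pv_foldl_idx_filter U (fun e => !pvSub U e)

-- B reduced to the same shape: sorted2 of the same filter of the same deduplicated list
theorem pv_alt_eq (entities : List (String × String)) :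
    filter_and_merge_entities_alt entities =
      PySem.List.sorted2
        ((PySem.Set.ofList (entities.map (fun p => (p.1, preprocess_entity_text p.2)))).filter
          (fun e => !pvSub (PySem.Set.ofList (entities.map (fun p => (p.1, preprocess_entity_text p.2)))) e))
        (fun x => x.1) (fun x => x.2) false := by
  unfold filter_and_merge_entities_alt
  have hc : (fun p : String × String => (p.1, bClean p.2)) = (fun p => (p.1, preprocess_entity_text p.2)) := by
    funext p; rw [clean_eq]
  rw [hc]
  refine congrArg (fun l : List (String × String) => PySem.List.sorted2 l (fun x => x.1) (fun x => x.2) false) ?_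
  refine List.filter_congr ?_
  intro p _
  rw [PySem.Dict.getD_foldl_modify_append]
  simp only [PySem.Dict.getD_empty, List.nil_append, List.any_map, pv_any_filter]
  unfold pvSub
  refine congrArg (fun b => !b) (congrArg (List.any _) ?_)
  funext b
  simp [pvCheck, Function.comp, pv_beq_comm, Bool.and_assoc]

-- ===== VERDICT (by name: the statement is the Claim_ definition above) =====
theorem filter_and_merge_entities_spec : Claim_equal_filter_and_merge_entities := by
  unfold Claim_equal_filter_and_merge_entities
  intro entities _
  unfold Spec_filter_and_merge_entities
  rw [pv_alt_eq]
  by_cases hnil : entities = []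
  · subst hnil; rfl
  · unfold filter_and_merge_entities
    rw [if_neg hnil]
    simp only [PySem.List.foldl_append_singleton_eq_map, List.nil_append]
    by_cases hle : PySem.List.len (PySem.Set.ofList (entities.map (fun p => (p.1, preprocess_entity_text p.2)))) ≤ 1
    · rw [if_pos hle]
      refine congrArg (fun l : List (String × String) => PySem.List.sorted2 l (fun x => x.1) (fun x => x.2) false) ?_
      generalize hU : PySem.Set.ofList (entities.map (fun p => (p.1, preprocess_entity_text p.2))) = U at *
      cases U with
      | nil => rfl
      | cons x xs =>
        cases xs with
        | nil => simp [pvSub, pvCheck]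
        | cons y ys => exfalso; simp [PySem.List.len] at hle; omega
    · rw [if_neg hle]
      exact congrArg (fun l : List (String × String) => PySem.List.sorted2 l (fun x => x.1) (fun x => x.2) false)
        (aBody_filter _)
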